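-- pv_equiv track=rewrite | github.com/allyssonallan/sanger_adna_damage | src/sanger_pipeline/core/adna_damage_analyzer.py | _count_transitions
-- ===== SOURCE A (Python) =====
-- def _count_transitions(
--     ref_seq: str, query_seq: str, from_base: str, to_base: str
-- ) -> int:
--     """
--     Count specific base transitions, excluding N bases and ambiguous calls.
--
--     Args:
--         ref_seq: Reference sequence
--         query_seq: Query sequence
--         from_base: Base in reference
--         to_base: Base in query
--
--     Returns:
--         Number of transitions
--     """
--     count = 0
--     for ref_base, query_base in zip(ref_seq, query_seq):
--         # Skip positions with N or ambiguous bases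
--         if (ref_base.upper() not in "ACGT" or
--             query_base.upper() not in "ACGT"):
--             continue
--
--         if ref_base.upper() == from_base and query_base.upper() == to_base:
--             count += 1
--     return count
-- ===== SOURCE B (Python) =====
-- def _count_transitions(ref_seq, query_seq, from_base, to_base):
--     # Tabulate the full joint frequency of (ref, query) uppercased base pairs
--     # in one pass, then answer the requested transition by table lookup.
--     pairs = [
--         (r.upper(), q.upper())
--         for r, q in zip(ref_seq, query_seq)
--         if r.upper() in "ACGT" and q.upper() in "ACGT"
--     ]
--     counts = {}
--     for key in pairs:
--         counts[key] = counts.get(key, 0) + 1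
--     return counts.get((from_base, to_base), 0)
-- ===== Notes on version B (the rewrite author's own statement) =====
-- stated objective: alternative
-- what changed: B builds the complete joint frequency table of uppercased (ref, query) base pairs (filtered to ACGT) in one pass and answers the requested transition by a defaulting table lookup, instead of A's per-position test-and-increment of a single scalar counter.
import Mathlib
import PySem

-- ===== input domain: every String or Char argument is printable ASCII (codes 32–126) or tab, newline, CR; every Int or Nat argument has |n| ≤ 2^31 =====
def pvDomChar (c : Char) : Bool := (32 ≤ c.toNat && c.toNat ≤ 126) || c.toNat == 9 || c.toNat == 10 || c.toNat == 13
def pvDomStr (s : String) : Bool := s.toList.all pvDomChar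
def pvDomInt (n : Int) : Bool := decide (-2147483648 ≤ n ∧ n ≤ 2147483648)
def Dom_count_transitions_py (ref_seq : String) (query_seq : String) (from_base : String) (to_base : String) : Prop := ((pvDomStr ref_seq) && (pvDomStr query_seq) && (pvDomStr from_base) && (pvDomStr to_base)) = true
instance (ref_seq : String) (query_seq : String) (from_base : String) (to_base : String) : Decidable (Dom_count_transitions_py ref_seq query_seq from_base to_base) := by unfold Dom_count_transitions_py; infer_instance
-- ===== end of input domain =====

-- B tabulates the full joint frequency of uppercased (ref, query) base pairs in one pass
-- and answers by table lookup, instead of testing-and-incrementing one scalar per position.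

-- ===== PORT A =====
-- per-position scalar counting; 'x.upper() in "ACGT"' for a single ASCII char is char membership (exact here)
def count_transitions_py (ref_seq : String) (query_seq : String) (from_base : String) (to_base : String) : Int :=
  (ref_seq.toList.zip query_seq.toList).foldl
    (fun count p =>
      if ¬("ACGT".toList.contains (PySem.Chars.upperChar p.1)) ∨
         ¬("ACGT".toList.contains (PySem.Chars.upperChar p.2)) then
        count
      else if String.singleton (PySem.Chars.upperChar p.1) = from_base ∧
              String.singleton (PySem.Chars.upperChar p.2) = to_base then
        count + 1
      else count) 0

-- ===== PORT B =====
-- list of kept uppercased pairs, then a frequency dict, then a lookup with default 0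
def count_transitions_py_alt (ref_seq : String) (query_seq : String) (from_base : String) (to_base : String) : Int :=
  let pairs := (ref_seq.toList.zip query_seq.toList).filterMap
    (fun p =>
      if "ACGT".toList.contains (PySem.Chars.upperChar p.1) &&
         "ACGT".toList.contains (PySem.Chars.upperChar p.2) then
        some (String.singleton (PySem.Chars.upperChar p.1), String.singleton (PySem.Chars.upperChar p.2))
      else none)
  let counts : PySem.Dict (String × String) Int :=
    pairs.foldl (fun d key => d.insert key (d.getD key 0 + 1)) PySem.Dict.empty
  counts.getD (from_base, to_base) 0

-- ===== PRECONDITION & SPEC =====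
def Spec_count_transitions_py (ref_seq : String) (query_seq : String) (from_base : String) (to_base : String) (out : Int) : Prop := out = count_transitions_py_alt ref_seq query_seq from_base to_base
instance (ref_seq : String) (query_seq : String) (from_base : String) (to_base : String) (out : Int) : Decidable (Spec_count_transitions_py ref_seq query_seq from_base to_base out) := by unfold Spec_count_transitions_py; infer_instance

-- ===== CLAIM (what is proved, stated in full; the proofs are below) =====
def Claim_equal_count_transitions_py : Prop := ∀ (ref_seq : String) (query_seq : String) (from_base : String) (to_base : String), Dom_count_transitions_py ref_seq query_seq from_base to_base → Spec_count_transitions_py ref_seq query_seq from_base to_base (count_transitions_py ref_seq query_seq from_base to_base)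

-- ===== LEMMAS AND PROOFS =====
lemma count_foldl_eq_filterMap_count (from_base to_base : String)
    (l : List (Char × Char)) (c : Int) :
    l.foldl
      (fun count p =>
        if ¬("ACGT".toList.contains (PySem.Chars.upperChar p.1)) ∨
           ¬("ACGT".toList.contains (PySem.Chars.upperChar p.2)) then
          count
        else if String.singleton (PySem.Chars.upperChar p.1) = from_base ∧
                String.singleton (PySem.Chars.upperChar p.2) = to_base then
          count + 1
        else count) c
    = c + ((l.filterMap
        (fun p =>
          if "ACGT".toList.contains (PySem.Chars.upperChar p.1) &&
             "ACGT".toList.contains (PySem.Chars.upperChar p.2) then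
            some (String.singleton (PySem.Chars.upperChar p.1), String.singleton (PySem.Chars.upperChar p.2))
          else none)).count (from_base, to_base) : Int) := by
  induction l generalizing c with
  | nil => simp
  | cons hd tl ih =>
    simp only [List.foldl_cons, List.filterMap_cons]
    by_cases h1 : "ACGT".toList.contains (PySem.Chars.upperChar hd.1) = true
    · by_cases h2 : "ACGT".toList.contains (PySem.Chars.upperChar hd.2) = true
      · simp only [h1, h2, not_true, false_or, if_false, Bool.and_self, if_true]
        by_cases h3 : String.singleton (PySem.Chars.upperChar hd.1) = from_base ∧
                      String.singleton (PySem.Chars.upperChar hd.2) = to_base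
        · rw [if_pos h3, ih]
          have : ((String.singleton (PySem.Chars.upperChar hd.1), String.singleton (PySem.Chars.upperChar hd.2)) : String × String) = (from_base, to_base) := by
            exact Prod.ext h3.1 h3.2
          rw [this, List.count_cons_self]
          push_cast; ring
        · rw [if_neg h3, ih]
          have : ((String.singleton (PySem.Chars.upperChar hd.1), String.singleton (PySem.Chars.upperChar hd.2)) : String × String) ≠ (from_base, to_base) := by
            intro h; exact h3 ⟨congrArg Prod.fst h, congrArg Prod.snd h⟩
          rw [List.count_cons_of_ne (by simpa using this)]
      · rw [if_pos (Or.inr h2), ih,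
          (Bool.and_eq_false_iff.mpr (Or.inr (Bool.eq_false_iff.mpr h2)) : ("ACGT".toList.contains (PySem.Chars.upperChar hd.1) &&
            "ACGT".toList.contains (PySem.Chars.upperChar hd.2)) = false)]
        simp
    · rw [if_pos (Or.inl h1), ih,
        (Bool.and_eq_false_iff.mpr (Or.inl (Bool.eq_false_iff.mpr h1)) : ("ACGT".toList.contains (PySem.Chars.upperChar hd.1) &&
          "ACGT".toList.contains (PySem.Chars.upperChar hd.2)) = false)]
      simp

-- ===== VERDICT (by name: the statement is the Claim_ definition above) =====
theorem count_transitions_py_spec : Claim_equal_count_transitions_py := by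
  intro ref_seq query_seq from_base to_base _
  unfold Spec_count_transitions_py count_transitions_py count_transitions_py_alt
  rw [PySem.Dict.getD_foldl_insert_add_one, PySem.Dict.getD_empty,
    count_foldl_eq_filterMap_count]
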